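-- pv_equiv track=rewrite | github.com/dnxnf/Meachine-Learning-New | pythonProblem/12FoodService.py | check
-- ===== SOURCE A (Python) =====
-- def check(m, add, p):
--     # m初始饭盒数量。add是单位时间内增加的数量。p是排队人数的序列
--     m -= p[0] #第一批肯定是够了，题目保证 P1≤M≤1000
--     # 开始取餐
--     for i in range(1, len(p)):
--         m += add # 增加了人
--         if m >= p[i]:
--             # 能满足p[i]的需求
--             m -= p[i]
--         # 不能满足需求只能false
--         else:
--             return False
--     # 都遍历完了。可以返回True
--     return True
-- ===== SOURCE B (Python) =====
-- def check(m, add, p):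
--     # Build the prefix-sum table of p once, then validate all batches in one pass:
--     # the box balance after serving batch i equals m + add*i - prefix[i].
--     prefix = []
--     s = 0
--     for x in p:
--         s += x
--         prefix.append(s)
--     return all(m + add * i - prefix[i] >= 0 for i in range(1, len(p)))
-- ===== Notes on version B (the rewrite author's own statement) =====
-- stated objective: alternative
-- what changed: B replaces A's incremental balance accumulator with early exit by a prefix-sum table built once plus a separate all() validation pass using the closed form m + add*i - prefix[i].
import Mathlib
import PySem

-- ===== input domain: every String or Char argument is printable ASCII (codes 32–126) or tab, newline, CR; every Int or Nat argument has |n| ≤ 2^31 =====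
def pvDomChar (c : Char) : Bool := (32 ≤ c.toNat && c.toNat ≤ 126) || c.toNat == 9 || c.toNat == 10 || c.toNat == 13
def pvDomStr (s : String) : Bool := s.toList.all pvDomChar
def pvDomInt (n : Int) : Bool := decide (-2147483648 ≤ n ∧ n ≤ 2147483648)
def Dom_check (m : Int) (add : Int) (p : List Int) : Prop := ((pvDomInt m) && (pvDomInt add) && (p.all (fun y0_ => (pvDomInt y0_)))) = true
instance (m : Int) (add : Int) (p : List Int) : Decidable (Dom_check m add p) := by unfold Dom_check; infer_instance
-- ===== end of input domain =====

-- B replaces A's incremental balance accumulator (with early exit) by a prefix-sum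
-- table plus one validation pass over the closed form m + add*i - prefix[i].

-- ===== PORT A =====
-- the for-loop over range(1, len(p)) threading the running balance m, with early return False
def checkLoop (add : Int) (p : List Int) : List Int → Int → Bool
  | [], _ => true
  | i :: rest, m =>
    let m' := m + add
    let pi := PySem.List.pyGetD p i 0
    if pi ≤ m' then checkLoop add p rest (m' - pi) else false

def check (m : Int) (add : Int) (p : List Int) : Bool :=
  let m0 := m - PySem.List.pyGetD p 0 0   -- m -= p[0]  (Pre_ guarantees p ≠ [])
  checkLoop add p (PySem.List.pyRange 1 p.length 1) m0

-- ===== PORT B =====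
def check_alt (m : Int) (add : Int) (p : List Int) : Bool :=
  -- prefix-sum table built by the loop in Source B
  let pre := (p.foldl (fun (acc : List Int × Int) x => (acc.1 ++ [acc.2 + x], acc.2 + x)) ([], 0)).1
  -- all(m + add*i - prefix[i] >= 0 for i in range(1, len(p)))
  (PySem.List.pyRange 1 p.length 1).all
    (fun i => decide (0 ≤ m + add * i - PySem.List.pyGetD pre i 0))

-- ===== PRECONDITION & SPEC =====
-- Pre_ excludes only the empty list, on which A raises IndexError at p[0].
def Pre_check (m : Int) (add : Int) (p : List Int) : Prop := p ≠ []
instance (m : Int) (add : Int) (p : List Int) : Decidable (Pre_check m add p) := by unfold Pre_check; infer_instance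
def pvWitness_check : Int × Int × List Int := (5, 1, [3, 2, 4])

def Spec_check (m : Int) (add : Int) (p : List Int) (out : Bool) : Prop := out = check_alt m add p
instance (m : Int) (add : Int) (p : List Int) (out : Bool) : Decidable (Spec_check m add p out) := by unfold Spec_check; infer_instance

-- ===== CLAIM (what is proved, stated in full; the proofs are below) =====
def Claim_equal_check : Prop := ∀ (m : Int) (add : Int) (p : List Int), Dom_check m add p → Pre_check m add p → Spec_check m add p (check m add p)

-- ===== LEMMAS AND PROOFS =====

-- the prefix-sum fold of Source B, characterised
theorem preFold_eq (p : List Int) : ∀ (l : List Int) (s : Int),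
    p.foldl (fun (acc : List Int × Int) x => (acc.1 ++ [acc.2 + x], acc.2 + x)) (l, s)
      = (l ++ (List.range p.length).map (fun k => s + (p.take (k+1)).sum), s + p.sum) := by
  induction p with
  | nil => intro l s; simp
  | cons x p ih =>
    intro l s
    simp only [List.foldl_cons, ih, List.length_cons, List.range_succ_eq_map,
      List.map_cons, List.map_map, Prod.mk.injEq]
    refine ⟨?_, by simp; ring⟩
    simp only [List.append_assoc, List.singleton_append, Function.comp_def,
      Nat.succ_eq_add_one, List.take_succ_cons, List.sum_cons, List.take_zero, List.sum_nil,
      add_zero]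
    congr 2
    exact List.map_congr_left (fun a _ => by ring)

theorem prefix_get (p : List Int) (i : Int) (h0 : 0 ≤ i) (hn : i < (p.length : Int)) :
    PySem.List.pyGetD
      ((p.foldl (fun (acc : List Int × Int) x => (acc.1 ++ [acc.2 + x], acc.2 + x)) ([], 0)).1) i 0
      = (p.take (i.toNat + 1)).sum := by
  rw [preFold_eq]
  have hi : i.toNat < p.length := by omega
  rw [PySem.List.pyGetD_eq_getElem _ 0 h0 (by simpa using hn)]
  simp [hi]

-- the main loop invariant: A's threaded balance equals the closed form on B's side
theorem loop_eq (add : Int) (p : List Int) (m : Int) : ∀ (k : Nat) (j : Int), 1 ≤ j →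
    (p.length : Int) - j ≤ (k : Int) →
    checkLoop add p (PySem.List.pyRange j p.length 1) (m + add * (j - 1) - (p.take (j - 1).toNat.succ).sum)
      = (PySem.List.pyRange j p.length 1).all
          (fun i => decide (0 ≤ m + add * i -
            PySem.List.pyGetD
              ((p.foldl (fun (acc : List Int × Int) x => (acc.1 ++ [acc.2 + x], acc.2 + x)) ([], 0)).1) i 0)) := by
  intro k
  induction k with
  | zero =>
    intro j h1 hk
    rw [PySem.List.pyRange_one_eq_nil (by omega)]
    simp [checkLoop]
  | succ k ih =>
    intro j h1 hk
    by_cases hlt : j < (p.length : Int)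
    · rw [PySem.List.pyRange_one_cons hlt]
      have h0j : 0 ≤ j := by omega
      have hget : PySem.List.pyGetD p j 0 = p[j.toNat] :=
        PySem.List.pyGetD_eq_getElem p 0 h0j (by simpa using hlt)
      have hpre := prefix_get p j h0j hlt
      have htake : (p.take (j.toNat + 1)).sum = (p.take (j - 1).toNat.succ).sum + p[j.toNat] := by
        have hj : (j - 1).toNat.succ = j.toNat := by omega
        rw [hj, List.sum_take_succ p j.toNat (by omega)]
      have hmul : add * j = add * (j - 1) + add := by ring
      simp only [checkLoop, List.all_cons, hget, hpre]
      by_cases hc : p[j.toNat] ≤ m + add * (j - 1) - (p.take (j - 1).toNat.succ).sum + add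
      · rw [if_pos hc]
        have hstate : m + add * (j - 1) - (p.take (j - 1).toNat.succ).sum + add - p[j.toNat]
            = m + add * ((j + 1) - 1) - (p.take ((j + 1) - 1).toNat.succ).sum := by
          have : ((j + 1) - 1).toNat = j.toNat := by omega
          rw [this]
          have hj : (j - 1).toNat.succ = j.toNat := by omega
          rw [show j.toNat.succ = j.toNat + 1 from rfl, htake, hj]
          ring
        rw [hstate, ih (j + 1) (by omega) (by push_cast at hk ⊢; omega)]
        have hdec : decide (0 ≤ m + add * j - (p.take (j.toNat + 1)).sum) = true := by
          simp only [htake, decide_eq_true_eq]; omega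
        rw [hdec]; simp
      · rw [if_neg hc]
        have hdec : decide (0 ≤ m + add * j - (p.take (j.toNat + 1)).sum) = false := by
          simp only [htake, decide_eq_false_iff_not]; omega
        rw [hdec]; simp
    · rw [PySem.List.pyRange_one_eq_nil (by omega)]
      simp [checkLoop]

-- ===== VERDICT (by name: the statement is the Claim_ definition above) =====
theorem check_spec : Claim_equal_check := by
  intro m add p _ hpre
  unfold Spec_check check check_alt
  have hne : p ≠ [] := hpre
  have hlen : 1 ≤ (p.length : Int) := by
    have : 0 < p.length := List.length_pos_of_ne_nil hne
    omega
  have h0 : PySem.List.pyGetD p 0 0 = (p.take (((1:Int) - 1).toNat.succ)).sum := by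
    cases p with
    | nil => exact absurd rfl hne
    | cons x xs => simp [PySem.List.pyGetD_zero_cons, List.take_succ_cons]
  have := loop_eq add p m p.length 1 (by omega) (by omega)
  simp only at this ⊢
  rw [show m - PySem.List.pyGetD p 0 0 = m + add * ((1:Int) - 1) - (p.take ((1:Int) - 1).toNat.succ).sum by rw [h0]; ring]
  exact this
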